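-- pv_equiv track=rewrite | github.com/lgarrison/adventofcode2025 | src/aoc/day07/__main__.py | parse_diagram
-- ===== SOURCE A (Python) =====
-- def parse_diagram(
--     lines: list[str],
-- ) -> tuple[tuple[int, int], int, set[tuple[int, int]]]:
--     grid: set[tuple[int, int]] = set()
--
--     start = None
--     end = 0
--     for y, line in enumerate(lines):
--         for x, ch in enumerate(line):
--             if ch == '^':
--                 grid.add((x, y))
--                 end = max(end, y)
--             if ch == 'S':
--                 start = (x, y)
--
--     return start, end + 1, grid
-- ===== SOURCE B (Python) =====
-- def parse_diagram(
--     lines: list[str],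
-- ) -> tuple[tuple[int, int], int, set[tuple[int, int]]]:
--     # Build-then-derive: flatten once into a cell list, then three independent passes.
--     cells = [(x, y, ch) for y, line in enumerate(lines) for x, ch in enumerate(line)]
--     grid = {(x, y) for x, y, ch in cells if ch == '^'}
--     end = max((y for x, y, ch in cells if ch == '^'), default=0)
--     start = next(((x, y) for x, y, ch in reversed(cells) if ch == 'S'), None)
--     return start, end + 1, grid
-- ===== Notes on version B (the rewrite author's own statement) =====
-- stated objective: alternative
-- what changed: Replaces A's fused stateful nested loop (one pass mutating grid/start/end together) by a build-then-derive decomposition: flatten the grid once into a cell list, then build the set by comprehension, take the max row by a generator max with default, and find the start as the first 'S' in the reversed cell list.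
import Mathlib
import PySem

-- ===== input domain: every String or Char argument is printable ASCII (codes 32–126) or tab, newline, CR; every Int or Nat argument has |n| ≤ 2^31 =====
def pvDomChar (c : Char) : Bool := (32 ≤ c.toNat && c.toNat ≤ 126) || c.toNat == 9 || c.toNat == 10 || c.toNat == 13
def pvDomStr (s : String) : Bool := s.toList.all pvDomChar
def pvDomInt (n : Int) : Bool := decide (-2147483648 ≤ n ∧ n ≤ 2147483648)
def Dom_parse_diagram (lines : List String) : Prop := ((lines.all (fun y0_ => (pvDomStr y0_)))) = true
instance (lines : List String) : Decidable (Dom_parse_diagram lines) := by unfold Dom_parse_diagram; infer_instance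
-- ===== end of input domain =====

-- B replaces A's fused stateful nested loop by a build-then-derive decomposition (same cost, alternative structure).

-- ===== PORT A =====
def parse_diagram (lines : List String) : (Option (Int × Int)) × Int × (List (Int × Int)) :=
  let st := (PySem.List.enumerate lines).foldl
    (fun (st : PySem.Set (Int × Int) × Option (Int × Int) × Int) (p : Int × String) =>
      (PySem.List.enumerate p.2.toList).foldl
        (fun (st : PySem.Set (Int × Int) × Option (Int × Int) × Int) (q : Int × Char) =>
          let st1 := if q.2 = '^' then (PySem.Set.add st.1 (q.1, p.1), st.2.1, max st.2.2 p.1) else st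
          if q.2 = 'S' then (st1.1, some (q.1, p.1), st1.2.2) else st1)
        st)
    (PySem.Set.empty, none, 0)
  (st.2.1, st.2.2 + 1, st.1)

-- ===== PORT B =====
-- the flattened cell list [(x, y, ch) …]
def pvCells (lines : List String) : List (Int × Int × Char) :=
  (PySem.List.enumerate lines).flatMap
    (fun p => (PySem.List.enumerate p.2.toList).map (fun q => (q.1, p.1, q.2)))

def parse_diagram_alt (lines : List String) : (Option (Int × Int)) × Int × (List (Int × Int)) :=
  let cells := pvCells lines
  let grid : PySem.Set (Int × Int) :=
    PySem.Set.ofList (cells.filterMap (fun c => if c.2.2 = '^' then some (c.1, c.2.1) else none))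
  let e := (PySem.List.max? (cells.filterMap (fun c => if c.2.2 = '^' then some c.2.1 else none))
      (fun y => y)).getD 0
  let start := (cells.reverse.find? (fun c => c.2.2 == 'S')).map (fun c => (c.1, c.2.1))
  (start, e + 1, grid)

-- ===== PRECONDITION & SPEC =====
def Spec_parse_diagram (lines : List String) (out : (Option (Int × Int)) × Int × (List (Int × Int))) : Prop := out = parse_diagram_alt lines
instance (lines : List String) (out : (Option (Int × Int)) × Int × (List (Int × Int))) : Decidable (Spec_parse_diagram lines out) := by unfold Spec_parse_diagram; infer_instance

-- ===== CLAIM (what is proved, stated in full; the proofs are below) =====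
def Claim_equal_parse_diagram : Prop := ∀ (lines : List String), Dom_parse_diagram lines → Spec_parse_diagram lines (parse_diagram lines)

-- ===== LEMMAS AND PROOFS =====

-- A's per-cell state transition, on flattened cells
def pvStep (st : PySem.Set (Int × Int) × Option (Int × Int) × Int) (c : Int × Int × Char) :
    PySem.Set (Int × Int) × Option (Int × Int) × Int :=
  let st1 := if c.2.2 = '^' then (PySem.Set.add st.1 (c.1, c.2.1), st.2.1, max st.2.2 c.2.1) else st
  if c.2.2 = 'S' then (st1.1, some (c.1, c.2.1), st1.2.2) else st1

theorem pvA_eq_foldl_cells (lines : List String)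
    (st : PySem.Set (Int × Int) × Option (Int × Int) × Int) :
    (PySem.List.enumerate lines).foldl
      (fun st (p : Int × String) =>
        (PySem.List.enumerate p.2.toList).foldl
          (fun (st : PySem.Set (Int × Int) × Option (Int × Int) × Int) (q : Int × Char) =>
            let st1 := if q.2 = '^' then (PySem.Set.add st.1 (q.1, p.1), st.2.1, max st.2.2 p.1) else st
            if q.2 = 'S' then (st1.1, some (q.1, p.1), st1.2.2) else st1)
          st)
      st
    = (pvCells lines).foldl pvStep st := by
  simp [pvCells, List.foldl_flatMap, List.foldl_map, pvStep]

theorem pvFold_grid (cs : List (Int × Int × Char))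
    (st : PySem.Set (Int × Int) × Option (Int × Int) × Int) :
    (cs.foldl pvStep st).1
      = (cs.filterMap (fun c => if c.2.2 = '^' then some (c.1, c.2.1) else none)).foldl
          PySem.Set.add st.1 := by
  induction cs generalizing st with
  | nil => rfl
  | cons c t ih =>
    simp only [List.foldl_cons, List.filterMap_cons, ih]
    by_cases h1 : c.2.2 = '^' <;> by_cases h2 : c.2.2 = 'S' <;>
      simp [pvStep, h1, h2]

theorem pvFold_end (cs : List (Int × Int × Char))
    (st : PySem.Set (Int × Int) × Option (Int × Int) × Int) :
    (cs.foldl pvStep st).2.2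
      = (cs.filterMap (fun c => if c.2.2 = '^' then some c.2.1 else none)).foldl max st.2.2 := by
  induction cs generalizing st with
  | nil => rfl
  | cons c t ih =>
    simp only [List.foldl_cons, List.filterMap_cons, ih]
    by_cases h1 : c.2.2 = '^' <;> by_cases h2 : c.2.2 = 'S' <;>
      simp [pvStep, h1, h2]

theorem pvFold_start (cs : List (Int × Int × Char))
    (st : PySem.Set (Int × Int) × Option (Int × Int) × Int) :
    (cs.foldl pvStep st).2.1
      = (cs.reverse.find? (fun c => c.2.2 == 'S')).elim st.2.1 (fun c => some (c.1, c.2.1)) := by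
  induction cs generalizing st with
  | nil => rfl
  | cons c t ih =>
    simp only [List.foldl_cons, List.reverse_cons, List.find?_append, ih]
    cases hf : t.reverse.find? (fun c => c.2.2 == 'S') with
    | some r => simp
    | none =>
      by_cases h2 : c.2.2 = 'S' <;> by_cases h1 : c.2.2 = '^' <;>
        simp [pvStep, h1, h2]

theorem pvMax_getD (ys : List Int) (h : ∀ y ∈ ys, 0 ≤ y) :
    ys.foldl max 0 = (PySem.List.max? ys (fun y => y)).getD 0 := by
  cases ys with
  | nil => rfl
  | cons y t =>
    rw [PySem.List.max?_id_cons]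
    have hy : max 0 y = y := max_eq_right (h y (by simp))
    simp [List.foldl_cons, hy]

theorem pvCells_snd_nonneg (lines : List String) :
    ∀ c ∈ pvCells lines, 0 ≤ c.2.1 := by
  intro c hc
  simp only [pvCells, List.mem_flatMap, List.mem_map] at hc
  obtain ⟨p, hp, q, _, rfl⟩ := hc
  rw [PySem.List.mem_enumerate_iff] at hp
  obtain ⟨k, _, rfl⟩ := hp
  simp

-- ===== VERDICT (by name: the statement is the Claim_ definition above) =====
theorem parse_diagram_spec : Claim_equal_parse_diagram := by
  intro lines _
  unfold Spec_parse_diagram parse_diagram parse_diagram_alt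
  rw [pvA_eq_foldl_cells]
  dsimp only
  refine Prod.ext ?_ (Prod.ext ?_ ?_)
  · rw [pvFold_start]
    cases hf : (pvCells lines).reverse.find? (fun c => c.2.2 == 'S') <;> simp
  · have hn : ∀ y ∈ (pvCells lines).filterMap (fun c => if c.2.2 = '^' then some c.2.1 else none),
        0 ≤ y := by
      intro y hy
      simp only [List.mem_filterMap] at hy
      obtain ⟨c, hc, hce⟩ := hy
      by_cases h1 : c.2.2 = '^'
      · simp [h1] at hce
        exact hce ▸ pvCells_snd_nonneg lines c hc
      · simp [h1] at hce
    have h2 : ((pvCells lines).foldl pvStep (PySem.Set.empty, none, 0)).2.2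
        = ((pvCells lines).filterMap (fun c => if c.2.2 = '^' then some c.2.1 else none)).foldl
            max 0 := pvFold_end _ _
    rw [h2, pvMax_getD _ hn]
  · exact pvFold_grid (pvCells lines) (PySem.Set.empty, none, 0)
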